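-- pv_equiv track=rewrite | github.com/samarthya/ad688-scratch | src/data/enhanced_processor.py | _categorize_job_function
-- ===== SOURCE A (Python) =====
-- def _categorize_job_function(title: str) -> str:
--     """Categorize job function based on title."""
--
--     title_lower = title.lower()
--
--     if any(keyword in title_lower for keyword in ["engineer", "developer", "architect"]):
--         return "Engineering"
--     elif any(keyword in title_lower for keyword in ["data", "analyst", "scientist"]):
--         return "Data & Analytics"
--     elif "product" in title_lower:
--         return "Product Management"
--     elif any(keyword in title_lower for keyword in ["marketing", "growth"]):
--         return "Marketing"
--     elif "sales" in title_lower: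
--         return "Sales"
--     elif any(keyword in title_lower for keyword in ["design", "ux", "ui"]):
--         return "Design"
--     else:
--         return "Other"
-- ===== SOURCE B (Python) =====
-- _CATEGORIES = ["Engineering", "Data & Analytics", "Product Management",
--                "Marketing", "Sales", "Design"]
--
-- _KEYWORDS = [("engineer", 0), ("developer", 0), ("architect", 0),
--              ("data", 1), ("analyst", 1), ("scientist", 1),
--              ("product", 2),
--              ("marketing", 3), ("growth", 3),
--              ("sales", 4),
--              ("design", 5), ("ux", 5), ("ui", 5)]
--
--
-- def _categorize_job_function(title: str) -> str:
--     """Categorize job function based on title.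
--
--     Single left-to-right scan of the title: at each position, every keyword
--     starting there lowers the best (smallest) priority seen so far; the final
--     best priority picks the category.
--     """
--     t = title.lower()
--     best = len(_CATEGORIES)
--     for i in range(len(t)):
--         for kw, pri in _KEYWORDS:
--             if t.startswith(kw, i):
--                 best = min(best, pri)
--     return _CATEGORIES[best] if best < len(_CATEGORIES) else "Other"
-- ===== Notes on version B (the rewrite author's own statement) =====
-- stated objective: alternative
-- what changed: Replaced A's priority-ordered substring-membership chain by a single left-to-right positional scan: at each index the keywords starting there lower a best-priority accumulator, and the final minimum priority selects the category.
import Mathlib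
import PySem

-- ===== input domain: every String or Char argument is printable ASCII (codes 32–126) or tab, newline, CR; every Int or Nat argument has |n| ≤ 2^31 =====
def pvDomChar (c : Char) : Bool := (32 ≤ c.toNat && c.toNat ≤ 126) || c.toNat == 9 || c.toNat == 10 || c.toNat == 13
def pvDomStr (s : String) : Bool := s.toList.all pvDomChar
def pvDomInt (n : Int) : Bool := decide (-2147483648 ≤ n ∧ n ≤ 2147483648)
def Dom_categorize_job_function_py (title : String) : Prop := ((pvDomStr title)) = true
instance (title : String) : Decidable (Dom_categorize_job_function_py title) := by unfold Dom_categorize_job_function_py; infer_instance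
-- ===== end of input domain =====

-- B replaces A's priority-ordered substring-membership chain by a single positional scan
-- of the title keeping a best-priority accumulator (alternative algorithm, same cost).

-- ===== PORT A =====
def categorize_job_function_py (title : String) : String :=
  let title_lower := PySem.Str.lower title
  if ["engineer", "developer", "architect"].any (fun keyword => PySem.Str.isIn keyword title_lower) then
    "Engineering"
  else if ["data", "analyst", "scientist"].any (fun keyword => PySem.Str.isIn keyword title_lower) then
    "Data & Analytics"
  else if PySem.Str.isIn "product" title_lower then
    "Product Management"
  else if ["marketing", "growth"].any (fun keyword => PySem.Str.isIn keyword title_lower) then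
    "Marketing"
  else if PySem.Str.isIn "sales" title_lower then
    "Sales"
  else if ["design", "ux", "ui"].any (fun keyword => PySem.Str.isIn keyword title_lower) then
    "Design"
  else
    "Other"

-- ===== PORT B =====
def pvCategories : List String :=
  ["Engineering", "Data & Analytics", "Product Management", "Marketing", "Sales", "Design"]

def pvKeywords : List (String × Nat) :=
  [("engineer", 0), ("developer", 0), ("architect", 0),
   ("data", 1), ("analyst", 1), ("scientist", 1),
   ("product", 2),
   ("marketing", 3), ("growth", 3),
   ("sales", 4),
   ("design", 5), ("ux", 5), ("ui", 5)]

-- Python's t.startswith(kw, i) for 0 ≤ i is exactly: kw is a prefix of t[i:].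
def pvStartsAt (tl : List Char) (i : Nat) (kw : String) : Bool :=
  PySem.Chars.startswith (tl.drop i) kw.toList

def categorize_job_function_py_alt (title : String) : String :=
  let tl := (PySem.Str.lower title).toList
  let best := (List.range tl.length).foldl
    (fun b i => pvKeywords.foldl
      (fun b kp => if pvStartsAt tl i kp.1 then min b kp.2 else b) b) 6
  if best < 6 then pvCategories.getD best "Other" else "Other"

-- ===== PRECONDITION & SPEC =====
def Spec_categorize_job_function_py (title : String) (out : String) : Prop := out = categorize_job_function_py_alt title
instance (title : String) (out : String) : Decidable (Spec_categorize_job_function_py title out) := by unfold Spec_categorize_job_function_py; infer_instance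

-- ===== CLAIM (what is proved, stated in full; the proofs are below) =====
def Claim_equal_categorize_job_function_py : Prop := ∀ (title : String), Dom_categorize_job_function_py title → Spec_categorize_job_function_py title (categorize_job_function_py title)

-- ===== LEMMAS AND PROOFS =====

-- the inner (per-position) keyword fold and the scan result, named for the lemmas
def pvInner (tl : List Char) (i : Nat) (b : Nat) (l : List (String × Nat)) : Nat :=
  l.foldl (fun b kp => if pvStartsAt tl i kp.1 then min b kp.2 else b) b

def pvScan (tl : List Char) (l : List Nat) (b : Nat) : Nat :=
  l.foldl (fun b i => pvInner tl i b pvKeywords) b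

lemma pvInner_le (tl : List Char) (i : Nat) (b : Nat) (l : List (String × Nat)) :
    pvInner tl i b l ≤ b := by
  induction l generalizing b with
  | nil => simp [pvInner]
  | cons kp rest ih =>
    simp only [pvInner, List.foldl_cons]
    refine le_trans (ih _) ?_
    split <;> simp

lemma pvScan_le (tl : List Char) (l : List Nat) (b : Nat) : pvScan tl l b ≤ b := by
  induction l generalizing b with
  | nil => simp [pvScan]
  | cons i rest ih =>
    simp only [pvScan, List.foldl_cons]
    exact le_trans (ih _) (pvInner_le _ _ _ _)

lemma pvInner_le_of_mem (tl : List Char) (i : Nat) (b : Nat) {l : List (String × Nat)}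
    {kp : String × Nat} (hm : kp ∈ l) (hs : pvStartsAt tl i kp.1 = true) :
    pvInner tl i b l ≤ kp.2 := by
  induction l generalizing b with
  | nil => cases hm
  | cons hd rest ih =>
    simp only [pvInner, List.foldl_cons]
    rcases List.mem_cons.mp hm with h | h
    · subst h
      refine le_trans (pvInner_le _ _ _ _) ?_
      simp [hs]
    · exact ih _ h

lemma pvScan_le_of_mem (tl : List Char) {l : List Nat} (b : Nat) {i : Nat}
    {kp : String × Nat} (hi : i ∈ l) (hm : kp ∈ pvKeywords)
    (hs : pvStartsAt tl i kp.1 = true) : pvScan tl l b ≤ kp.2 := by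
  induction l generalizing b with
  | nil => cases hi
  | cons j rest ih =>
    simp only [pvScan, List.foldl_cons]
    rcases List.mem_cons.mp hi with h | h
    · subst h
      refine le_trans (pvScan_le _ _ _) (pvInner_le_of_mem _ _ _ hm hs)
    · exact ih _ h

lemma pvInner_cases (tl : List Char) (i : Nat) (b : Nat) (l : List (String × Nat)) :
    pvInner tl i b l = b ∨
      ∃ kp ∈ l, pvStartsAt tl i kp.1 = true ∧ pvInner tl i b l = kp.2 := by
  induction l generalizing b with
  | nil => left; simp [pvInner]
  | cons kp rest ih =>
    by_cases hs : pvStartsAt tl i kp.1 = true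
    · have hstep : pvInner tl i b (kp :: rest) = pvInner tl i (min b kp.2) rest := by
        simp [pvInner, hs]
      rcases ih (min b kp.2) with h | ⟨kq, hq, hsq, hv⟩
      · rcases Nat.le_total b kp.2 with hle | hle
        · left; rw [hstep, h, Nat.min_eq_left hle]
        · right
          exact ⟨kp, List.mem_cons_self, hs, by rw [hstep, h, Nat.min_eq_right hle]⟩
      · right; exact ⟨kq, List.mem_cons_of_mem _ hq, hsq, by rw [hstep, hv]⟩
    · have hstep : pvInner tl i b (kp :: rest) = pvInner tl i b rest := by
        simp [pvInner, hs]
      rcases ih b with h | ⟨kq, hq, hsq, hv⟩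
      · left; rw [hstep, h]
      · right; exact ⟨kq, List.mem_cons_of_mem _ hq, hsq, by rw [hstep, hv]⟩

lemma pvScan_cases (tl : List Char) (l : List Nat) (b : Nat) :
    pvScan tl l b = b ∨
      ∃ i ∈ l, ∃ kp ∈ pvKeywords, pvStartsAt tl i kp.1 = true ∧ pvScan tl l b = kp.2 := by
  induction l generalizing b with
  | nil => left; simp [pvScan]
  | cons j rest ih =>
    have hstep : pvScan tl (j :: rest) b = pvScan tl rest (pvInner tl j b pvKeywords) := rfl
    rcases ih (pvInner tl j b pvKeywords) with h | ⟨i, hi, kp, hm, hs, hv⟩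
    · rcases pvInner_cases tl j b pvKeywords with h2 | ⟨kp, hm, hs, hv⟩
      · left; rw [hstep, h, h2]
      · right
        exact ⟨j, List.mem_cons_self, kp, hm, hs, by rw [hstep, h, hv]⟩
    · right; exact ⟨i, List.mem_cons_of_mem _ hi, kp, hm, hs, by rw [hstep, hv]⟩

-- occurrence of a (nonempty) keyword as a substring ↔ it starts at some scanned position
lemma occ_iff (s : String) (kw : String) (hne : kw.toList ≠ []) :
    PySem.Str.isIn kw s = true ↔
      ∃ i ∈ List.range s.toList.length, pvStartsAt s.toList i kw = true := by
  rw [PySem.Str.isIn_eq]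
  rw [← PySem.Chars.exists_prefix_drop_iff_isIn]
  constructor
  · rintro ⟨j, hj⟩
    have hjlt : j < s.toList.length := by
      by_contra h
      push_neg at h
      rw [List.drop_eq_nil_of_le h] at hj
      exact hne (List.prefix_nil.mp hj)
    exact ⟨j, List.mem_range.mpr hjlt, (PySem.Chars.startswith_iff _ _).mpr hj⟩
  · rintro ⟨i, _, hs⟩
    exact ⟨i, (PySem.Chars.startswith_iff _ _).mp hs⟩

set_option maxHeartbeats 1600000 in
theorem categorize_job_function_py_spec : Claim_equal_categorize_job_function_py := by
  intro title _
  show categorize_job_function_py title = categorize_job_function_py_alt title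
  have halt : categorize_job_function_py_alt title =
      (if pvScan ((PySem.Str.lower title).toList)
            (List.range ((PySem.Str.lower title).toList).length) 6 < 6
       then pvCategories.getD
            (pvScan ((PySem.Str.lower title).toList)
              (List.range ((PySem.Str.lower title).toList).length) 6) "Other"
       else "Other") := rfl
  rw [halt]
  set tl := (PySem.Str.lower title).toList with htl
  set r := pvScan tl (List.range tl.length) 6 with hr
  -- occurrence booleans, phrased exactly as A's conditions
  have hocc : ∀ kp ∈ pvKeywords, PySem.Str.isIn kp.1 (PySem.Str.lower title) = true ↔
      ∃ i ∈ List.range tl.length, pvStartsAt tl i kp.1 = true := by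
    intro kp hm
    have := occ_iff (PySem.Str.lower title) kp.1 (by fin_cases hm <;> decide)
    simpa [htl] using this
  -- upper bound: any occurring keyword bounds r
  have hub : ∀ kp ∈ pvKeywords, PySem.Str.isIn kp.1 (PySem.Str.lower title) = true → r ≤ kp.2 := by
    intro kp hm ho
    rcases (hocc kp hm).mp ho with ⟨i, hi, hs⟩
    exact pvScan_le_of_mem tl 6 hi hm hs
  -- membership: r is 6 or the priority of some occurring keyword
  have hcases : r = 6 ∨ ∃ kp ∈ pvKeywords, PySem.Str.isIn kp.1 (PySem.Str.lower title) = true ∧ r = kp.2 := by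
    rcases pvScan_cases tl (List.range tl.length) 6 with h | ⟨i, hi, kp, hm, hs, hv⟩
    · left; exact h
    · right; exact ⟨kp, hm, (hocc kp hm).mpr ⟨i, hi, hs⟩, hv⟩
  clear_value tl r
  -- finish by case analysis on the six group conditions
  by_cases h0 : (PySem.Str.isIn "engineer" (PySem.Str.lower title) = true ∨
PySem.Str.isIn "developer" (PySem.Str.lower title) = true ∨
PySem.Str.isIn "architect" (PySem.Str.lower title) = true)
  · have hrv : r = 0 := by
      have hle : r ≤ 0 := by
        rcases h0 with h | h | h
        case _ => exact hub ("engineer", 0) (by simp [pvKeywords]) h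
        case _ => exact hub ("developer", 0) (by simp [pvKeywords]) h
        case _ => exact hub ("architect", 0) (by simp [pvKeywords]) h
      omega
    clear halt hocc hub hcases
    simp at h0
    simp only [categorize_job_function_py]
    simp [h0, hrv, pvCategories]
  · 
    by_cases h1 : (PySem.Str.isIn "data" (PySem.Str.lower title) = true ∨
PySem.Str.isIn "analyst" (PySem.Str.lower title) = true ∨
PySem.Str.isIn "scientist" (PySem.Str.lower title) = true)
    · have hrv : r = 1 := by
        have hle : r ≤ 1 := by
          rcases h1 with h | h | h
          case _ => exact hub ("data", 1) (by simp [pvKeywords]) h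
          case _ => exact hub ("analyst", 1) (by simp [pvKeywords]) h
          case _ => exact hub ("scientist", 1) (by simp [pvKeywords]) h
        rcases hcases with h | ⟨kp, hm, ho, hv⟩
        · omega
        · fin_cases hm <;> dsimp only at ho hv
          · exact absurd (Or.inl ho) h0
          · exact absurd (Or.inr (Or.inl ho)) h0
          · exact absurd (Or.inr (Or.inr ho)) h0
          · omega
          · omega
          · omega
          · omega
          · omega
          · omega
          · omega
          · omega
          · omega
          · omega
      clear halt hocc hub hcases
      simp at h0 h1
      simp only [categorize_job_function_py]
      simp [h0, h1, hrv, pvCategories]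
    · 
      by_cases h2 : (PySem.Str.isIn "product" (PySem.Str.lower title) = true)
      · have hrv : r = 2 := by
          have hle : r ≤ 2 := by
            exact hub ("product", 2) (by simp [pvKeywords]) h2
          rcases hcases with h | ⟨kp, hm, ho, hv⟩
          · omega
          · fin_cases hm <;> dsimp only at ho hv
            · exact absurd (Or.inl ho) h0
            · exact absurd (Or.inr (Or.inl ho)) h0
            · exact absurd (Or.inr (Or.inr ho)) h0
            · exact absurd (Or.inl ho) h1
            · exact absurd (Or.inr (Or.inl ho)) h1
            · exact absurd (Or.inr (Or.inr ho)) h1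
            · omega
            · omega
            · omega
            · omega
            · omega
            · omega
            · omega
        clear halt hocc hub hcases
        simp at h0 h1 h2
        simp only [categorize_job_function_py]
        simp [h0, h1, h2, hrv, pvCategories]
      · 
        by_cases h3 : (PySem.Str.isIn "marketing" (PySem.Str.lower title) = true ∨
PySem.Str.isIn "growth" (PySem.Str.lower title) = true)
        · have hrv : r = 3 := by
            have hle : r ≤ 3 := by
              rcases h3 with h | h
              case _ => exact hub ("marketing", 3) (by simp [pvKeywords]) h
              case _ => exact hub ("growth", 3) (by simp [pvKeywords]) h
            rcases hcases with h | ⟨kp, hm, ho, hv⟩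
            · omega
            · fin_cases hm <;> dsimp only at ho hv
              · exact absurd (Or.inl ho) h0
              · exact absurd (Or.inr (Or.inl ho)) h0
              · exact absurd (Or.inr (Or.inr ho)) h0
              · exact absurd (Or.inl ho) h1
              · exact absurd (Or.inr (Or.inl ho)) h1
              · exact absurd (Or.inr (Or.inr ho)) h1
              · exact absurd ho h2
              · omega
              · omega
              · omega
              · omega
              · omega
              · omega
          clear halt hocc hub hcases
          simp at h0 h1 h2 h3
          simp only [categorize_job_function_py]
          simp [h0, h1, h2, h3, hrv, pvCategories]
        · 
          by_cases h4 : (PySem.Str.isIn "sales" (PySem.Str.lower title) = true)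
          · have hrv : r = 4 := by
              have hle : r ≤ 4 := by
                exact hub ("sales", 4) (by simp [pvKeywords]) h4
              rcases hcases with h | ⟨kp, hm, ho, hv⟩
              · omega
              · fin_cases hm <;> dsimp only at ho hv
                · exact absurd (Or.inl ho) h0
                · exact absurd (Or.inr (Or.inl ho)) h0
                · exact absurd (Or.inr (Or.inr ho)) h0
                · exact absurd (Or.inl ho) h1
                · exact absurd (Or.inr (Or.inl ho)) h1
                · exact absurd (Or.inr (Or.inr ho)) h1
                · exact absurd ho h2
                · exact absurd (Or.inl ho) h3
                · exact absurd (Or.inr ho) h3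
                · omega
                · omega
                · omega
                · omega
            clear halt hocc hub hcases
            simp at h0 h1 h2 h3 h4
            simp only [categorize_job_function_py]
            simp [h0, h1, h2, h3, h4, hrv, pvCategories]
          · 
            by_cases h5 : (PySem.Str.isIn "design" (PySem.Str.lower title) = true ∨
PySem.Str.isIn "ux" (PySem.Str.lower title) = true ∨
PySem.Str.isIn "ui" (PySem.Str.lower title) = true)
            · have hrv : r = 5 := by
                have hle : r ≤ 5 := by
                  rcases h5 with h | h | h
                  case _ => exact hub ("design", 5) (by simp [pvKeywords]) h
                  case _ => exact hub ("ux", 5) (by simp [pvKeywords]) h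
                  case _ => exact hub ("ui", 5) (by simp [pvKeywords]) h
                rcases hcases with h | ⟨kp, hm, ho, hv⟩
                · omega
                · fin_cases hm <;> dsimp only at ho hv
                  · exact absurd (Or.inl ho) h0
                  · exact absurd (Or.inr (Or.inl ho)) h0
                  · exact absurd (Or.inr (Or.inr ho)) h0
                  · exact absurd (Or.inl ho) h1
                  · exact absurd (Or.inr (Or.inl ho)) h1
                  · exact absurd (Or.inr (Or.inr ho)) h1
                  · exact absurd ho h2
                  · exact absurd (Or.inl ho) h3
                  · exact absurd (Or.inr ho) h3
                  · exact absurd ho h4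
                  · omega
                  · omega
                  · omega
              clear halt hocc hub hcases
              simp at h0 h1 h2 h3 h4 h5
              simp only [categorize_job_function_py]
              simp [h0, h1, h2, h3, h4, h5, hrv, pvCategories]
            · 
              have hrv : r = 6 := by
                rcases hcases with h | ⟨kp, hm, ho, hv⟩
                · exact h
                · fin_cases hm <;> dsimp only at ho hv
                  · exact absurd (Or.inl ho) h0
                  · exact absurd (Or.inr (Or.inl ho)) h0
                  · exact absurd (Or.inr (Or.inr ho)) h0
                  · exact absurd (Or.inl ho) h1
                  · exact absurd (Or.inr (Or.inl ho)) h1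
                  · exact absurd (Or.inr (Or.inr ho)) h1
                  · exact absurd ho h2
                  · exact absurd (Or.inl ho) h3
                  · exact absurd (Or.inr ho) h3
                  · exact absurd ho h4
                  · exact absurd (Or.inl ho) h5
                  · exact absurd (Or.inr (Or.inl ho)) h5
                  · exact absurd (Or.inr (Or.inr ho)) h5
              clear halt hocc hub hcases
              simp at h0 h1 h2 h3 h4 h5
              simp only [categorize_job_function_py]
              simp [h0, h1, h2, h3, h4, h5, hrv]
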